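-- pv_equiv track=rewrite | github.com/jakub-baranski/AoC2025 | 3/3.py | largest_number_in_line_index
-- ===== SOURCE A (Python) =====
-- def largest_number_in_line_index(line: str, batteries_remaining: int) -> int:
--     largest = -1
--     index = -1
--     for i, char in enumerate(line):
--         num = int(char)
--         if num > largest and (
--             len(line) - i > batteries_remaining
--         ):  # Ensure there is a next character
--             largest = num
--             index = i
--     return index
-- ===== SOURCE B (Python) =====
-- def largest_number_in_line_index(line: str, batteries_remaining: int) -> int:
--     vals = [int(c) for c in line]
--     cutoff = len(line) - batteries_remaining
--     if cutoff <= 0: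
--         return -1
--     region = vals[:cutoff]
--     return region.index(max(region)) if region else -1
-- ===== Notes on version B (the rewrite author's own statement) =====
-- stated objective: simpler
-- what changed: Replaces A's manual running-max loop with explicit (largest, index) state by a build-then-slice decomposition: build the digit list, take the allowed prefix vals[:len(line)-batteries_remaining], and return region.index(max(region)).
import Mathlib
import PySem

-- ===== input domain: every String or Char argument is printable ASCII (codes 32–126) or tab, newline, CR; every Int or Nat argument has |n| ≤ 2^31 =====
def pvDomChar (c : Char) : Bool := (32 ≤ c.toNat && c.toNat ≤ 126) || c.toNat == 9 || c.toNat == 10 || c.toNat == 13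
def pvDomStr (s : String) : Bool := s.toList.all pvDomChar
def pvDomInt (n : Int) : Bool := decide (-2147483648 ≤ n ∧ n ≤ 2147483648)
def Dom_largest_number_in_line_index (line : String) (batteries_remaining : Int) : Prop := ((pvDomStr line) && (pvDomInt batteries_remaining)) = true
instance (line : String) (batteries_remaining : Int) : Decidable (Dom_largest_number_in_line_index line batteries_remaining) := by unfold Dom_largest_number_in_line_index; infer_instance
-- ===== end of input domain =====

-- B replaces A's manual running-max loop by a build-then-slice decomposition (digit list, prefix slice, max + first index); objective: simpler.

-- ===== PORT A =====
-- literal port of A: single pass over enumerate(line), state (largest, index), strict improvement guarded by len(line) - i > batteries_remaining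
def largest_number_in_line_index (line : String) (batteries_remaining : Int) : Int :=
  let r := (PySem.List.enumerate line.toList 0).foldl
    (fun (st : Int × Int) (p : Int × Char) =>
      let num := (PySem.Int.ofChars? [p.2]).getD 0   -- int(char); none = ValueError, excluded by Pre_
      if num > st.1 ∧ PySem.Str.len line - p.1 > batteries_remaining then (num, p.1) else st)
    (-1, -1)
  r.2

-- ===== PORT B =====
-- literal port of Source B: vals = [int(c) for c in line]; cutoff; region = vals[:cutoff]; region.index(max(region))
def largest_number_in_line_index_alt (line : String) (batteries_remaining : Int) : Int :=
  let vals := line.toList.map (fun c => (PySem.Int.ofChars? [c]).getD 0)   -- int(c); none = ValueError, excluded by Pre_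
  let cutoff := PySem.Str.len line - batteries_remaining
  if cutoff ≤ 0 then -1
  else
    let region := PySem.List.slice vals none (some cutoff)
    if region = [] then -1
    else
      match PySem.List.max? region (fun x => x) with
      | some m => (((PySem.List.index? region m).getD 0 : Nat) : Int)
      | none => -1   -- unreachable: region ≠ []

-- ===== PRECONDITION & SPEC =====
-- Pre_ excludes exactly the inputs where Python A raises ValueError: int(char) over EVERY character of line, so any non-digit character anywhere raises (B raises there too).
def Pre_largest_number_in_line_index (line : String) (batteries_remaining : Int) : Prop :=
  line.toList.all (fun c => c.isDigit) = true
instance (line : String) (batteries_remaining : Int) : Decidable (Pre_largest_number_in_line_index line batteries_remaining) := by unfold Pre_largest_number_in_line_index; infer_instance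

def pvWitness_largest_number_in_line_index : String × Int := ("3142", 1)

def Spec_largest_number_in_line_index (line : String) (batteries_remaining : Int) (out : Int) : Prop := out = largest_number_in_line_index_alt line batteries_remaining
instance (line : String) (batteries_remaining : Int) (out : Int) : Decidable (Spec_largest_number_in_line_index line batteries_remaining out) := by unfold Spec_largest_number_in_line_index; infer_instance

-- ===== CLAIM (what is proved, stated in full; the proofs are below) =====
def Claim_equal_largest_number_in_line_index : Prop := ∀ (line : String) (batteries_remaining : Int), Dom_largest_number_in_line_index line batteries_remaining → Pre_largest_number_in_line_index line batteries_remaining → Spec_largest_number_in_line_index line batteries_remaining (largest_number_in_line_index line batteries_remaining)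

-- ===== LEMMAS AND PROOFS =====

-- the per-character digit value both ports share
def pvVal (c : Char) : Int := (PySem.Int.ofChars? [c]).getD 0

theorem pvOfChars_digit (c : Char) (h : c.isDigit = true) :
    PySem.Int.ofChars? [c] = some ((c.toNat : Int) - 48) := by
  have h48 : 48 ≤ c.toNat ∧ c.toNat ≤ 57 := by
    simp [Char.isDigit] at h
    exact ⟨h.1, h.2⟩
  have hc : Char.ofNat c.toNat = c := Char.ofNat_toNat c
  obtain ⟨h1, h2⟩ := h48
  interval_cases hn : c.toNat <;> rw [← hc] <;> decide

theorem pvVal_nonneg (c : Char) (h : c.isDigit = true) : 0 ≤ pvVal c := by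
  simp [pvVal, pvOfChars_digit c h]
  have : 48 ≤ c.toNat := by
    simp [Char.isDigit] at h
    exact h.1
  omega

-- A's loop body on (index, value) pairs
def pvStep (n br : Int) (st : Int × Int) (q : Int × Int) : Int × Int :=
  if q.2 > st.1 ∧ n - q.1 > br then (q.2, q.1) else st

-- spec of the strict-improvement scan: value of the max, index (from the left) of its first occurrence
def pvBest : List Int → Int × Int
  | [] => (-1, -1)
  | v :: t =>
    let p := pvBest t
    if p.1 ≤ v then (v, 0) else (p.1, p.2 + 1)

theorem pvBest_cons (v : Int) (t : List Int) :
    pvBest (v :: t) = if (pvBest t).1 ≤ v then (v, 0) else ((pvBest t).1, (pvBest t).2 + 1) := rfl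

theorem pvStep_def (n br : Int) (st q : Int × Int) :
    pvStep n br st q = if q.2 > st.1 ∧ n - q.1 > br then (q.2, q.1) else st := rfl

theorem pvEnumerate_map {α β : Type} (g : α → β) (cs : List α) (k : Int) :
    PySem.List.enumerate (cs.map g) k = (PySem.List.enumerate cs k).map (fun p => (p.1, g p.2)) := by
  induction cs generalizing k with
  | nil => simp [PySem.List.enumerate]
  | cons c t ih => simp [PySem.List.enumerate_cons, ih]

theorem pvFold_noop (n br : Int) (vs : List Int) (k : Int) (st : Int × Int)
    (h : n - k ≤ br) :
    (PySem.List.enumerate vs k).foldl (pvStep n br) st = st := by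
  induction vs generalizing k st with
  | nil => simp [PySem.List.enumerate]
  | cons v t ih =>
    rw [PySem.List.enumerate_cons]
    simp only [List.foldl_cons]
    rw [pvStep_def, if_neg (by simp; omega)]
    exact ih (k + 1) st (by omega)

theorem pvFold_free (n br : Int) (vs : List Int) (k L I : Int)
    (hL : -1 ≤ L) (hpos : ∀ v ∈ vs, 0 ≤ v) (hfree : k + vs.length ≤ n - br) :
    (PySem.List.enumerate vs k).foldl (pvStep n br) (L, I) =
      (if L < (pvBest vs).1 then ((pvBest vs).1, k + (pvBest vs).2) else (L, I)) := by
  induction vs generalizing k L I with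
  | nil =>
    simp [PySem.List.enumerate, pvBest]
    omega
  | cons v t ih =>
    have hv : 0 ≤ v := hpos v (by simp)
    have hpos' : ∀ w ∈ t, 0 ≤ w := fun w hw => hpos w (by simp [hw])
    have hcond : n - k > br := by
      have := hfree; simp at this; omega
    rw [PySem.List.enumerate_cons]
    simp only [List.foldl_cons]
    rw [pvStep_def]
    have hfree' : (k + 1) + t.length ≤ n - br := by
      have := hfree; simp at this ⊢; omega
    rw [pvBest_cons]
    by_cases hvL : v > L
    · rw [if_pos (by exact ⟨hvL, hcond⟩)]
      rw [ih (k + 1) v k (by omega) hpos' hfree']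
      by_cases hm : (pvBest t).1 ≤ v
      · rw [if_pos hm, if_neg (by omega), if_pos (by simp; omega)]
        simp
      · rw [if_neg hm]
        rw [if_pos (by omega), if_pos (by simp; omega)]
        simp only [Prod.mk.injEq]
        constructor
        · trivial
        · ring
    · rw [if_neg (by intro hc; exact hvL hc.1)]
      rw [ih (k + 1) L I hL hpos' hfree']
      by_cases hm : (pvBest t).1 ≤ v
      · rw [if_pos hm]
        rw [if_neg (by omega), if_neg (by simp; omega)]
      · rw [if_neg hm]
        by_cases hLm : L < (pvBest t).1
        · rw [if_pos hLm, if_pos (by simp; omega)]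
          simp only [Prod.mk.injEq]
          constructor
          · trivial
          · ring
        · rw [if_neg hLm, if_neg (by simp; omega)]

theorem pvBest_mem (ds : List Int) (hne : ds ≠ []) (hpos : ∀ v ∈ ds, 0 ≤ v) :
    (pvBest ds).1 ∈ ds ∧ ∀ y ∈ ds, y ≤ (pvBest ds).1 := by
  induction ds with
  | nil => simp at hne
  | cons v t ih =>
    have hv : 0 ≤ v := hpos v (by simp)
    rw [pvBest_cons]
    by_cases ht : t = []
    · subst ht
      rw [if_pos (by simp [pvBest]; omega)]
      simp
    · obtain ⟨hmem, hmax⟩ := ih ht (fun w hw => hpos w (by simp [hw]))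
      by_cases hm : (pvBest t).1 ≤ v
      · rw [if_pos hm]
        refine ⟨by simp, fun y hy => ?_⟩
        rcases List.mem_cons.mp hy with h | h
        · omega
        · have := hmax y h; omega
      · rw [if_neg hm]
        refine ⟨by simp [hmem], fun y hy => ?_⟩
        rcases List.mem_cons.mp hy with h | h
        · omega
        · exact hmax y h

theorem pvBest_index (ds : List Int) (hne : ds ≠ []) (hpos : ∀ v ∈ ds, 0 ≤ v) :
    ∃ j : Nat, PySem.List.index? ds (pvBest ds).1 = some j ∧ (j : Int) = (pvBest ds).2 := by
  induction ds with
  | nil => simp at hne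
  | cons v t ih =>
    have hv : 0 ≤ v := hpos v (by simp)
    rw [pvBest_cons]
    by_cases ht : t = []
    · subst ht
      rw [if_pos (by simp [pvBest]; omega)]
      exact ⟨0, PySem.List.index?_cons_self v [], rfl⟩
    · have hpos' : ∀ w ∈ t, 0 ≤ w := fun w hw => hpos w (by simp [hw])
      obtain ⟨j, hj, hjv⟩ := ih ht hpos'
      by_cases hm : (pvBest t).1 ≤ v
      · rw [if_pos hm]
        exact ⟨0, PySem.List.index?_cons_self v t, rfl⟩
      · rw [if_neg hm]
        have hvne : v ≠ (pvBest t).1 := by omega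
        refine ⟨j + 1, ?_, by push_cast; omega⟩
        rw [PySem.List.index?_cons_of_ne t hvne, hj]
        rfl

theorem pvMax?_eq_best (ds : List Int) (hne : ds ≠ []) (hpos : ∀ v ∈ ds, 0 ≤ v) :
    PySem.List.max? ds (fun x => x) = some (pvBest ds).1 := by
  obtain ⟨M, hM⟩ : ∃ M, PySem.List.max? ds (fun x => x) = some M := by
    rcases h : PySem.List.max? ds (fun x => x) with _ | M
    · exact absurd ((PySem.List.max?_eq_none_iff ds (fun x => x)).mp h) hne
    · exact ⟨M, rfl⟩
  have hMmem : M ∈ ds := PySem.List.max?_mem hM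
  have hMmax : ∀ y ∈ ds, y ≤ M := fun y hy => PySem.List.max?_isMax hM y hy
  obtain ⟨hBmem, hBmax⟩ := pvBest_mem ds hne hpos
  have : M = (pvBest ds).1 := le_antisymm (hBmax M hMmem) (hMmax _ hBmem)
  rw [hM, this]

-- ===== VERDICT (by name: the statement is the Claim_ definition above) =====
theorem largest_number_in_line_index_spec : Claim_equal_largest_number_in_line_index := by
  intro line br _hDom hPre'
  have hPre : ∀ c ∈ line.toList, c.isDigit = true := by
    intro c hc
    exact List.all_eq_true.mp hPre' c hc
  unfold Spec_largest_number_in_line_index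
  unfold largest_number_in_line_index largest_number_in_line_index_alt
  set cs := line.toList with hcs
  set n : Int := PySem.Str.len line with hn
  have hnlen : n = (cs.length : Int) := by
    rw [hn, hcs, PySem.Str.len_eq]
  set vals : List Int := cs.map (fun c => (PySem.Int.ofChars? [c]).getD 0) with hvals
  have hvlen : vals.length = cs.length := by simp [hvals]
  have hpos : ∀ v ∈ vals, 0 ≤ v := by
    intro v hv
    rw [hvals] at hv
    obtain ⟨c, hc, rfl⟩ := List.mem_map.mp hv
    exact pvVal_nonneg c (hPre c hc)
  -- rewrite A's fold as a fold of pvStep over enumerate vals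
  have hA : (PySem.List.enumerate cs 0).foldl
      (fun (st : Int × Int) (p : Int × Char) =>
        let num := (PySem.Int.ofChars? [p.2]).getD 0
        if num > st.1 ∧ n - p.1 > br then (num, p.1) else st) (-1, -1)
      = (PySem.List.enumerate vals 0).foldl (pvStep n br) (-1, -1) := by
    rw [hvals, pvEnumerate_map, List.foldl_map]
    rfl
  simp only []
  rw [hA]
  by_cases hcut : n - br ≤ 0
  · -- cutoff ≤ 0: A's guard never fires, B returns -1 up front
    rw [pvFold_noop n br vals 0 (-1, -1) (by omega)]
    rw [if_pos hcut]
  · -- cutoff > 0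
    rw [if_neg hcut]
    have hcut' : (0:Int) < n - br := by omega
    set m : Nat := (n - br).toNat with hm
    have hmInt : (m : Int) = n - br := Int.toNat_of_nonneg (by omega)
    have hslice : PySem.List.slice vals none (some (n - br)) = vals.take m := by
      exact PySem.List.slice_to vals (by omega)
    rw [hslice]
    set region := vals.take m with hregion
    have hposR : ∀ v ∈ region, 0 ≤ v := fun v hv => hpos v (List.mem_of_mem_take hv)
    -- split A's fold at m
    have hsplitL : vals = region ++ vals.drop m := (List.take_append_drop m vals).symm
    have hfoldsplit : (PySem.List.enumerate vals 0).foldl (pvStep n br) (-1, -1)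
        = (PySem.List.enumerate (vals.drop m) (0 + region.length)).foldl (pvStep n br)
            ((PySem.List.enumerate region 0).foldl (pvStep n br) (-1, -1)) := by
      conv_lhs => rw [hsplitL]
      rw [PySem.List.enumerate_append, List.foldl_append]
    rw [hfoldsplit]
    have hregLen : region.length = min m vals.length := by simp [hregion]
    have hprefix : (PySem.List.enumerate region 0).foldl (pvStep n br) (-1, -1)
        = (if (-1:Int) < (pvBest region).1 then ((pvBest region).1, 0 + (pvBest region).2) else (-1, -1)) := by
      apply pvFold_free n br region 0 (-1) (-1) (le_refl _) hposR
      have : (region.length : Int) ≤ (m : Int) := by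
        rw [hregLen]; push_cast [Nat.cast_min]; omega
      omega
    rw [hprefix]
    have htail : ∀ st : Int × Int,
        (PySem.List.enumerate (vals.drop m) (0 + region.length)).foldl (pvStep n br) st = st := by
      intro st
      rcases Nat.lt_or_ge m vals.length with hml | hml
      · apply pvFold_noop
        have : region.length = m := by rw [hregLen]; omega
        rw [this]
        omega
      · rw [List.drop_eq_nil_of_le hml]
        simp [PySem.List.enumerate]
    rw [htail]
    by_cases hre : region = []
    · -- empty region (line is empty): both sides -1
      rw [if_pos hre]
      rw [hre]
      simp [pvBest]
    · rw [if_neg hre]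
      obtain ⟨hBmem, _⟩ := pvBest_mem region hre hposR
      have hB1 : 0 ≤ (pvBest region).1 := hposR _ hBmem
      rw [if_pos (by omega)]
      rw [pvMax?_eq_best region hre hposR]
      obtain ⟨j, hj, hjv⟩ := pvBest_index region hre hposR
      simp only []
      rw [hj]
      simp [hjv]
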